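-- pv_equiv track=rewrite | github.com/SeungAhSon/Baekjoon | SWEA/D5/24002. 쪼개기/쪼개기.py | get_possible_lengths
-- ===== SOURCE A (Python) =====
-- from collections import deque
--
-- def get_possible_lengths(x):
--     visited = {}
--     queue = deque()
--     queue.append((x,0))
--
--     while queue:
--         curr, cost = queue.popleft()
--         if curr in visited : continue
--         visited[curr] = cost
--
--         if curr>=2:
--             half = curr // 2
--             rest = curr - half
--             queue.append((half, cost + 1))
--             queue.append((rest, cost + 1))
--     return visited
-- ===== SOURCE B (Python) =====
-- def get_possible_lengths(x):
--     # Closed-form interval walk: at depth d the reachable split values form an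
--     # interval [lo, hi] with hi - lo <= 1, so we track just its endpoints.
--     visited = {}
--     lo = hi = x
--     d = 0
--     while True:
--         if lo not in visited:
--             visited[lo] = d
--         if hi not in visited:
--             visited[hi] = d
--         if hi < 2:
--             return visited
--         lo = (lo if lo >= 2 else hi) // 2
--         hi = hi - hi // 2
--         d += 1
-- ===== Notes on version B (the rewrite author's own statement) =====
-- stated objective: alternative
-- what changed: Replaces A's BFS queue/frontier entirely with a closed-form interval walk: at each depth the reachable split values form a pair of (at most two, adjacent) endpoints, so B keeps only the two endpoints and a depth counter, halving them (floor for the lower endpoint, ceiling for the upper) per step; no queue or frontier collection exists.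
import Mathlib
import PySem

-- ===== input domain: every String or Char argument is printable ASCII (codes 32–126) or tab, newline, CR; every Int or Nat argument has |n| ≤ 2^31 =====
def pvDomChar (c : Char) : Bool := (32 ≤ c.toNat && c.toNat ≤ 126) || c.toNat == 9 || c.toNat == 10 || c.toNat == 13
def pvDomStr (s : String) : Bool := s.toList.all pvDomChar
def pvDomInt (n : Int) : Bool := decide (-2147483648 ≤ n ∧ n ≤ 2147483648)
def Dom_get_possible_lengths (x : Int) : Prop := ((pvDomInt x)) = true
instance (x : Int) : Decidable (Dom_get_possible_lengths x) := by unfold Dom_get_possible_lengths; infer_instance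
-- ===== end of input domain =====

-- B drops A's BFS queue entirely: the reachable values at each depth form an interval
-- [lo, hi] with hi - lo ≤ 1, so B walks just the two endpoints with a depth counter.

-- ===== PORT A =====
-- termination measure for A's BFS loop (cited by decreasing_by)
def pvMeasA (q : List (Int × Int)) : Nat := (q.map (fun p => 3 ^ p.1.toNat)).sum

-- a node ≥ 2 of value c spawns children whose combined measure is strictly below 3^c
theorem pvKey (c : Int) (h2 : 2 ≤ c) :
    3 ^ (PySem.Int.floordiv c 2).toNat + 3 ^ (c - PySem.Int.floordiv c 2).toNat + 1
      ≤ 3 ^ c.toNat := by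
  rw [PySem.Int.floordiv_eq_ediv_of_pos (by omega)]
  have h1 : (c / 2).toNat ≤ c.toNat - 1 := by omega
  have h2' : (c - c / 2).toNat ≤ c.toNat - 1 := by omega
  have p1 : (3:Nat) ^ (c / 2).toNat ≤ 3 ^ (c.toNat - 1) :=
    Nat.pow_le_pow_right (by norm_num) h1
  have p2 : (3:Nat) ^ (c - c / 2).toNat ≤ 3 ^ (c.toNat - 1) :=
    Nat.pow_le_pow_right (by norm_num) h2'
  have p3 : (1:Nat) ≤ 3 ^ (c.toNat - 1) := Nat.one_le_pow _ _ (by norm_num)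
  have he : (3:Nat) ^ c.toNat = 3 ^ (c.toNat - 1) * 3 := by
    rw [← pow_succ]; congr 1; omega
  omega

def loopA : List (Int × Int) → PySem.Dict Int Int → PySem.Dict Int Int
  | [], visited => visited
  | (curr, cost) :: queue, visited =>
    if visited.contains curr then loopA queue visited
    else if h2 : 2 ≤ curr then
      loopA (queue ++ [(PySem.Int.floordiv curr 2, cost + 1),
                       (curr - PySem.Int.floordiv curr 2, cost + 1)])
        (visited.insert curr cost)
    else loopA queue (visited.insert curr cost)
termination_by q _ => pvMeasA q
decreasing_by
  · have hp : 0 < 3 ^ curr.toNat := Nat.pow_pos (by norm_num)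
    simp only [pvMeasA, List.map_cons, List.sum_cons]
    omega
  · have hk := pvKey curr h2
    simp only [pvMeasA, List.map_cons, List.map_nil, List.map_append,
      List.sum_cons, List.sum_nil, List.sum_append]
    omega
  · have hp : 0 < 3 ^ curr.toNat := Nat.pow_pos (by norm_num)
    simp only [pvMeasA, List.map_cons, List.sum_cons]
    omega

def get_possible_lengths (x : Int) : List (Int × Int) :=
  (loopA [(x, 0)] PySem.Dict.empty).items

-- ===== PORT B =====
-- B's `while True` loop: state is just the interval endpoints, the depth and the dict
def loopC (lo hi d : Int) (visited : PySem.Dict Int Int) : PySem.Dict Int Int :=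
  let v1 := if visited.contains lo then visited else visited.insert lo d
  let v2 := if v1.contains hi then v1 else v1.insert hi d
  if h : hi < 2 then v2
  else loopC (PySem.Int.floordiv (if 2 ≤ lo then lo else hi) 2)
             (hi - PySem.Int.floordiv hi 2) (d + 1) v2
termination_by hi.toNat
decreasing_by
  rw [show PySem.Int.floordiv hi 2 = hi / 2 from
    PySem.Int.floordiv_eq_ediv_of_pos (by norm_num)]
  omega

def get_possible_lengths_alt (x : Int) : List (Int × Int) :=
  (loopC x x 0 PySem.Dict.empty).items

-- ===== PRECONDITION & SPEC =====
def Spec_get_possible_lengths (x : Int) (out : List (Int × Int)) : Prop := out = get_possible_lengths_alt x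
instance (x : Int) (out : List (Int × Int)) : Decidable (Spec_get_possible_lengths x out) := by unfold Spec_get_possible_lengths; infer_instance

-- ===== CLAIM (what is proved, stated in full; the proofs are below) =====
def Claim_equal_get_possible_lengths : Prop := ∀ (x : Int), Dom_get_possible_lengths x → Spec_get_possible_lengths x (get_possible_lengths x)

-- ===== LEMMAS AND PROOFS =====

-- proof device: A's BFS processed level by level; state = (visited, next frontier)
def stepB (cost : Int) (st : PySem.Dict Int Int × List Int) (curr : Int) :
    PySem.Dict Int Int × List Int :=
  if st.1.contains curr then st
  else if 2 ≤ curr then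
    (st.1.insert curr cost,
     st.2 ++ [PySem.Int.floordiv curr 2, curr - PySem.Int.floordiv curr 2])
  else (st.1.insert curr cost, st.2)

def pvMeasB (l : List Int) : Nat := (l.map (fun c => 3 ^ c.toNat)).sum

-- one level of the frontier fold shrinks the measure (cited by decreasing_by)
theorem pvInnerBound (cost : Int) (fr : List Int) :
    ∀ (v : PySem.Dict Int Int) (acc : List Int),
      pvMeasB (fr.foldl (stepB cost) (v, acc)).2 + fr.length ≤ pvMeasB acc + pvMeasB fr := by
  induction fr with
  | nil => intro v acc; simp [pvMeasB]
  | cons c cs ih =>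
    intro v acc
    simp only [List.foldl_cons, List.length_cons]
    have hp : 0 < 3 ^ c.toNat := Nat.pow_pos (by norm_num)
    have hm : pvMeasB (c :: cs) = 3 ^ c.toNat + pvMeasB cs := by simp [pvMeasB]
    by_cases hc : v.contains c
    · rw [show stepB cost (v, acc) c = (v, acc) from by simp [stepB, hc]]
      have := ih v acc; omega
    · by_cases h2 : 2 ≤ c
      · rw [show stepB cost (v, acc) c
            = (v.insert c cost,
               acc ++ [PySem.Int.floordiv c 2, c - PySem.Int.floordiv c 2]) from by
          simp [stepB, hc, h2]]
        have := ih (v.insert c cost)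
          (acc ++ [PySem.Int.floordiv c 2, c - PySem.Int.floordiv c 2])
        have hk := pvKey c h2
        have ha : pvMeasB (acc ++ [PySem.Int.floordiv c 2, c - PySem.Int.floordiv c 2])
            = pvMeasB acc + (3 ^ (PySem.Int.floordiv c 2).toNat
              + 3 ^ (c - PySem.Int.floordiv c 2).toNat) := by simp [pvMeasB]
        omega
      · rw [show stepB cost (v, acc) c = (v.insert c cost, acc) from by
          simp [stepB, hc, h2]]
        have := ih (v.insert c cost) acc; omega

-- proof device: the level-by-level driver A reduces to
def loopB : List Int → Int → PySem.Dict Int Int → PySem.Dict Int Int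
  | [], _, visited => visited
  | c :: cs, cost, visited =>
    loopB ((c :: cs).foldl (stepB cost) (visited, [])).2 (cost + 1)
      ((c :: cs).foldl (stepB cost) (visited, [])).1
termination_by fr _ _ => pvMeasB fr
decreasing_by
  · have hb := pvInnerBound cost (c :: cs) visited []
    have hp : 0 < 3 ^ c.toNat := Nat.pow_pos (by norm_num)
    have hm : pvMeasB (c :: cs) = 3 ^ c.toNat + pvMeasB cs := by simp [pvMeasB]
    have hz : pvMeasB [] = 0 := by simp [pvMeasB]
    simp only [List.length_cons] at hb
    omega

theorem loopA_nil (v : PySem.Dict Int Int) : loopA [] v = v := by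
  rw [loopA.eq_def]

theorem loopA_cons (curr cost : Int) (queue : List (Int × Int)) (v : PySem.Dict Int Int) :
    loopA ((curr, cost) :: queue) v =
      if v.contains curr then loopA queue v
      else if h2 : 2 ≤ curr then
        loopA (queue ++ [(PySem.Int.floordiv curr 2, cost + 1),
                         (curr - PySem.Int.floordiv curr 2, cost + 1)])
          (v.insert curr cost)
      else loopA queue (v.insert curr cost) := by
  rw [loopA.eq_def]

theorem loopB_nil (cost : Int) (v : PySem.Dict Int Int) : loopB [] cost v = v := by
  rw [loopB.eq_def]

theorem loopB_cons (c : Int) (cs : List Int) (cost : Int) (v : PySem.Dict Int Int) :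
    loopB (c :: cs) cost v =
      loopB ((c :: cs).foldl (stepB cost) (v, [])).2 (cost + 1)
        ((c :: cs).foldl (stepB cost) (v, [])).1 := by
  rw [loopB.eq_def]

-- A's queue, seen as the remaining current level followed by the partial next level,
-- is consumed exactly as the level fold over the current level.
theorem pvLevel (k : Int) (cur : List Int) :
    ∀ (nxt : List Int) (v : PySem.Dict Int Int),
      loopA (cur.map (fun c => (c, k)) ++ nxt.map (fun c => (c, k + 1))) v
        = loopA ((cur.foldl (stepB k) (v, nxt)).2.map (fun c => (c, k + 1)))
            (cur.foldl (stepB k) (v, nxt)).1 := by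
  induction cur with
  | nil => intro nxt v; simp
  | cons c cs ih =>
    intro nxt v
    rw [List.map_cons, List.cons_append, loopA_cons, List.foldl_cons]
    by_cases hc : v.contains c
    · rw [if_pos hc, show stepB k (v, nxt) c = (v, nxt) from by simp [stepB, hc]]
      exact ih nxt v
    · rw [if_neg hc]
      by_cases h2 : 2 ≤ c
      · rw [dif_pos h2, show stepB k (v, nxt) c
            = (v.insert c k,
               nxt ++ [PySem.Int.floordiv c 2, c - PySem.Int.floordiv c 2]) from by
          simp [stepB, hc, h2]]
        rw [List.append_assoc]
        have hmap : (nxt.map (fun c => (c, k + 1)))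
              ++ [(PySem.Int.floordiv c 2, k + 1), (c - PySem.Int.floordiv c 2, k + 1)]
            = (nxt ++ [PySem.Int.floordiv c 2, c - PySem.Int.floordiv c 2]).map
                (fun c => (c, k + 1)) := by simp
        rw [hmap]
        exact ih _ _
      · rw [dif_neg h2, show stepB k (v, nxt) c = (v.insert c k, nxt) from by
          simp [stepB, hc, h2]]
        exact ih nxt _

-- A run level by level equals the level driver, by strong induction on the measure
theorem pvMain : ∀ (n : Nat) (cur : List Int) (k : Int) (v : PySem.Dict Int Int),
    pvMeasB cur ≤ n → loopA (cur.map (fun c => (c, k))) v = loopB cur k v := by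
  intro n
  induction n with
  | zero =>
    intro cur k v h
    cases cur with
    | nil => rw [List.map_nil, loopA_nil, loopB_nil]
    | cons c cs =>
      exfalso
      have hp : 0 < 3 ^ c.toNat := Nat.pow_pos (by norm_num)
      have hm : pvMeasB (c :: cs) = 3 ^ c.toNat + pvMeasB cs := by simp [pvMeasB]
      omega
  | succ n ih =>
    intro cur k v h
    cases cur with
    | nil => rw [List.map_nil, loopA_nil, loopB_nil]
    | cons c cs =>
      have hlvl := pvLevel k (c :: cs) [] v
      simp only [List.map_nil, List.append_nil] at hlvl
      rw [hlvl, loopB_cons]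
      have hb := pvInnerBound k (c :: cs) v []
      have hz : pvMeasB [] = 0 := by simp [pvMeasB]
      simp only [List.length_cons] at hb
      exact ih _ _ _ (by omega)

-- abbreviations for the level fold's effect
def insIf (v : PySem.Dict Int Int) (k d : Int) : PySem.Dict Int Int :=
  if v.contains k then v else v.insert k d

def chlL (w : Int) : List Int :=
  if 2 ≤ w then [PySem.Int.floordiv w 2, w - PySem.Int.floordiv w 2] else []

theorem contains_insIf (v : PySem.Dict Int Int) (k d w : Int) :
    (insIf v k d).contains w = (w == k || v.contains w) := by
  unfold insIf
  split
  · rename_i h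
    by_cases hw : w = k
    · subst hw; simp [h]
    · simp [hw]
  · simp [PySem.Dict.contains_insert]

theorem stepB_eq (d : Int) (st : PySem.Dict Int Int × List Int) (c : Int) :
    stepB d st c = (insIf st.1 c d, st.2 ++ (if st.1.contains c then [] else chlL c)) := by
  rcases st with ⟨v, acc⟩
  by_cases h : v.contains c <;> by_cases h2 : 2 ≤ c <;>
    simp [stepB, insIf, chlL, h, h2]

theorem fold_pair (d lo hi : Int) (v : PySem.Dict Int Int) (acc : List Int) :
    [lo, hi].foldl (stepB d) (v, acc) =
      (insIf (insIf v lo d) hi d,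
       (acc ++ (if v.contains lo then [] else chlL lo))
         ++ (if (insIf v lo d).contains hi then [] else chlL hi)) := by
  simp [List.foldl_cons, List.foldl_nil, stepB_eq]

-- if a list starts with a ≠ b, every b in it is preceded by a
theorem pvHeadBefore {a b : Int} (hne : a ≠ b) :
    ∀ (rest f1 f2 : List Int), a :: rest = f1 ++ b :: f2 → a ∈ f1 := by
  intro rest f1 f2 h
  cases f1 with
  | nil => simp at h; exact absurd h.1 hne
  | cons c f1' =>
    simp only [List.cons_append, List.cons.injEq] at h
    exact h.1 ▸ List.mem_cons_self ..

theorem stepB_idle (d c : Int) (st : PySem.Dict Int Int × List Int)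
    (h : st.1.contains c = true) : stepB d st c = st := by
  rcases st with ⟨v, acc⟩; simp only [stepB]; rw [if_pos h]

-- any frontier satisfying the order/membership conditions folds like [lo, hi]
theorem fold_canon (d lo hi : Int) :
    ∀ (f : List Int) (v : PySem.Dict Int Int) (acc : List Int),
      lo ≤ hi →
      (∀ w ∈ f, w = lo ∨ w = hi) →
      (¬ v.contains lo = true → lo ∈ f) →
      (¬ v.contains hi = true → hi ∈ f) →
      (lo < hi → ¬ v.contains lo = true → ∀ f1 f2, f = f1 ++ hi :: f2 → lo ∈ f1) →
      f.foldl (stepB d) (v, acc) = [lo, hi].foldl (stepB d) (v, acc) := by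
  intro f
  induction f with
  | nil =>
    intro v acc hle h2 h3 h4 h5
    have hl : v.contains lo = true := by by_contra h; simpa using h3 h
    have hh : v.contains hi = true := by by_contra h; simpa using h4 h
    rw [List.foldl_cons, stepB_idle d lo (v, acc) hl,
        List.foldl_cons, stepB_idle d hi (v, acc) hh, List.foldl_nil]
  | cons c cs ih =>
    intro v acc hle h2 h3 h4 h5
    have h2' : ∀ w ∈ cs, w = lo ∨ w = hi := fun w hw => h2 w (List.mem_cons_of_mem _ hw)
    by_cases hcl : c = lo
    · subst hcl
      by_cases hvl : v.contains c = true
      · rw [List.foldl_cons, stepB_idle d c (v, acc) hvl]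
        refine ih v acc hle h2' (fun h => absurd hvl h) ?_ (fun _ h => absurd hvl h)
        intro h
        rcases List.mem_cons.mp (h4 h) with heq | hm
        · exact absurd (by rw [heq]; exact hvl) h
        · exact hm
      · rw [List.foldl_cons]
        have hc1 : (stepB d (v, acc) c).1 = insIf v c d := by rw [stepB_eq]
        have hcontl : (stepB d (v, acc) c).1.contains c = true := by
          rw [hc1, contains_insIf]; simp
        have hIH := ih (stepB d (v, acc) c).1 (stepB d (v, acc) c).2 hle h2'
          (fun h => absurd hcontl h)
          (fun h => by
            rw [hc1, contains_insIf] at h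
            have hne : hi ≠ c := by intro e; exact h (by simp [e])
            have hnc : ¬ v.contains hi = true := fun hcv => h (by simp [hcv])
            rcases List.mem_cons.mp (h4 hnc) with heq | hm
            · exact absurd heq hne
            · exact hm)
          (fun _ h => absurd hcontl h)
        rw [Prod.mk.eta] at hIH
        rw [hIH]
        rw [show ([c, hi].foldl (stepB d) (stepB d (v, acc) c))
              = [hi].foldl (stepB d) (stepB d (stepB d (v, acc) c) c) from by
            simp only [List.foldl_cons]]
        rw [stepB_idle d c _ hcontl]
        simp only [List.foldl_cons]
    · have hc : c = hi := (h2 c (List.mem_cons_self ..)).resolve_left hcl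
      subst hc
      have hlo : v.contains lo = true := by
        by_contra h
        have hlt : lo < c := lt_of_le_of_ne hle (fun e => hcl e.symm)
        have := h5 hlt h [] cs rfl
        simp at this
      rw [List.foldl_cons]
      have hrhs : [lo, c].foldl (stepB d) (v, acc)
          = [c].foldl (stepB d) (v, acc) := by
        simp only [List.foldl_cons]
        rw [stepB_idle d lo (v, acc) hlo]
      by_cases hvh : v.contains c = true
      · rw [stepB_idle d c (v, acc) hvh, hrhs]
        have := ih v acc hle h2' (fun h => absurd hlo h) (fun h => absurd hvh h)
          (fun _ h => absurd hlo h)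
        rw [this, hrhs]
      · have hc1 : (stepB d (v, acc) c).1 = insIf v c d := by rw [stepB_eq]
        have hcontl : (stepB d (v, acc) c).1.contains lo = true := by
          rw [hc1, contains_insIf]; simp [hlo]
        have hconth : (stepB d (v, acc) c).1.contains c = true := by
          rw [hc1, contains_insIf]; simp
        have hIH := ih (stepB d (v, acc) c).1 (stepB d (v, acc) c).2 hle h2'
          (fun h => absurd hcontl h) (fun h => absurd hconth h)
          (fun _ h => absurd hcontl h)
        rw [Prod.mk.eta] at hIH
        rw [hIH, hrhs]
        simp only [List.foldl_cons, List.foldl_nil]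
        rw [stepB_idle d lo _ hcontl, stepB_idle d c _ hconth]

-- the loop invariant tying A's frontier to B's interval endpoints
def InvF (f : List Int) (lo hi : Int) (v : PySem.Dict Int Int) : Prop :=
  lo ≤ hi ∧ hi ≤ lo + 1 ∧
  (∀ w ∈ f, w = lo ∨ w = hi) ∧
  (¬ v.contains lo = true → lo ∈ f) ∧
  (¬ v.contains hi = true → hi ∈ f) ∧
  (lo < hi → ¬ v.contains lo = true → ∀ f1 f2, f = f1 ++ hi :: f2 → lo ∈ f1) ∧
  (2 ≤ lo → v.contains lo = false) ∧
  (∀ w : Int, v.contains w = true → lo ≤ w) ∧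
  (2 ≤ lo → v.contains hi = false)

theorem inv_init (x : Int) : InvF [x] x x PySem.Dict.empty := by
  refine ⟨le_refl x, by omega, ?_, ?_, ?_, ?_, ?_, ?_, ?_⟩ <;>
    simp [PySem.Dict.contains_empty]

theorem loopC_stop (lo hi d : Int) (v : PySem.Dict Int Int) (h : hi < 2) :
    loopC lo hi d v = insIf (insIf v lo d) hi d := by
  rw [loopC.eq_def]; simp [insIf, h]

theorem loopC_go (lo hi d : Int) (v : PySem.Dict Int Int) (h : ¬ hi < 2) :
    loopC lo hi d v =
      loopC (PySem.Int.floordiv (if 2 ≤ lo then lo else hi) 2)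
        (hi - PySem.Int.floordiv hi 2) (d + 1) (insIf (insIf v lo d) hi d) := by
  rw [loopC.eq_def]; simp [insIf, h]

-- on an empty frontier both endpoints are already recorded and loopC is the identity
theorem sim_nil (lo hi d : Int) (v : PySem.Dict Int Int) (hI : InvF [] lo hi v) :
    v = loopC lo hi d v := by
  obtain ⟨i1, i2, _, i4, i5, _, i7, i8, i9⟩ := hI
  have hl : v.contains lo = true := by by_contra h; simpa using i4 h
  have hh : v.contains hi = true := by by_contra h; simpa using i5 h
  have hlo2 : lo < 2 := by
    by_contra h
    rw [i7 (by omega)] at hl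
    exact Bool.false_ne_true hl
  have hins : insIf (insIf v lo d) hi d = v := by
    unfold insIf; rw [if_pos hl, if_pos hh]
  by_cases h : hi < 2
  · rw [loopC_stop _ _ _ _ h, hins]
  · have hhi : hi = 2 := by omega
    have hloe : lo = 1 := by omega
    subst hhi; subst hloe
    rw [loopC_go _ _ _ _ h, hins]
    rw [show (if (2:Int) ≤ 1 then (1:Int) else 2) = 2 from by norm_num]
    rw [show PySem.Int.floordiv (2:Int) 2 = 1 from by decide]
    rw [show (2:Int) - 1 = 1 from by norm_num]
    rw [loopC_stop _ _ _ _ (by norm_num)]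
    unfold insIf
    rw [if_pos hl, if_pos hl]

-- the invariant is preserved by one level step (the heart of the equivalence)
theorem inv_step (lo hi d : Int) (v : PySem.Dict Int Int)
    (h1 : lo ≤ hi) (h2 : hi ≤ lo + 1)
    (h7 : 2 ≤ lo → v.contains lo = false)
    (h8 : ∀ w : Int, v.contains w = true → lo ≤ w)
    (h9 : 2 ≤ lo → v.contains hi = false)
    (hhi : 2 ≤ hi) :
    InvF ((if v.contains lo then [] else chlL lo)
            ++ (if (insIf v lo d).contains hi then [] else chlL hi))
      (PySem.Int.floordiv (if 2 ≤ lo then lo else hi) 2) (hi - PySem.Int.floordiv hi 2)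
      (insIf (insIf v lo d) hi d) := by
  have e2 : ∀ a : Int, PySem.Int.floordiv a 2 = a / 2 :=
    fun a => PySem.Int.floordiv_eq_ediv_of_pos (by norm_num)
  have hcont : ∀ w, (insIf (insIf v lo d) hi d).contains w
      = (w == hi || (w == lo || v.contains w)) := by
    intro w; rw [contains_insIf, contains_insIf]
  have hcfalse : ∀ w, w ≠ hi → w ≠ lo → v.contains w = false →
      (insIf (insIf v lo d) hi d).contains w = false := by
    intro w hwh hwl hwv
    rw [hcont w, hwv]
    simp [hwh, hwl]
  have hsmall : ∀ w, w < lo → v.contains w = false := by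
    intro w hw
    cases hc : v.contains w with
    | false => rfl
    | true => exact absurd (h8 w hc) (by omega)
  by_cases hlo2 : 2 ≤ lo
  · -- main case: lo-block is present
    have hfl : v.contains lo = false := h7 hlo2
    have hbl : (if v.contains lo then ([]:List Int) else chlL lo)
        = [lo / 2, lo - lo / 2] := by
      rw [hfl]
      simp only [chlL, e2]
      rw [if_neg (by simp), if_pos hlo2]
    by_cases hhl : hi = lo
    · -- hi = lo: the hi-block is empty
      subst hhl
      have hbh : (if (insIf v hi d).contains hi then ([]:List Int) else chlL hi) = [] := by
        rw [contains_insIf]; simp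
      rw [hbl, hbh, List.append_nil]
      simp only [if_pos hlo2, e2]
      refine ⟨by omega, by omega, ?_, ?_, ?_, ?_, ?_, ?_, ?_⟩
      · intro w hw
        rcases List.mem_cons.mp hw with h | h
        · left; exact h
        · right; simpa using h
      · intro _; exact List.mem_cons_self ..
      · intro _; simp
      · intro hlt _ f1 f2 heq
        exact pvHeadBefore (by omega) _ f1 f2 heq
      · intro hq
        exact hcfalse _ (by omega) (by omega) (hsmall _ (by omega))
      · intro w hw
        rw [hcont w] at hw
        simp only [Bool.or_eq_true, beq_iff_eq] at hw
        rcases hw with h | h | h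
        · omega
        · omega
        · have := h8 w h; omega
      · intro hq
        exact hcfalse _ (by omega) (by omega) (hsmall _ (by omega))
    · -- hi = lo + 1: both blocks present
      have hfh : v.contains hi = false := h9 hlo2
      have hbh : (if (insIf v lo d).contains hi then ([]:List Int) else chlL hi)
          = [hi / 2, hi - hi / 2] := by
        rw [contains_insIf, hfh]
        simp only [chlL, e2]
        rw [if_neg (by simp [hhl]), if_pos (by omega)]
      rw [hbl, hbh]
      simp only [if_pos hlo2, e2, List.cons_append, List.nil_append]
      refine ⟨by omega, by omega, ?_, ?_, ?_, ?_, ?_, ?_, ?_⟩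
      · intro w hw
        simp only [List.mem_cons, List.not_mem_nil, or_false] at hw
        rcases hw with h | h | h | h <;> omega
      · intro _; exact List.mem_cons_self ..
      · intro _; simp
      · intro hlt _ f1 f2 heq
        exact pvHeadBefore (by omega) _ f1 f2 heq
      · intro hq
        exact hcfalse _ (by omega) (by omega) (hsmall _ (by omega))
      · intro w hw
        rw [hcont w] at hw
        simp only [Bool.or_eq_true, beq_iff_eq] at hw
        rcases hw with h | h | h
        · omega
        · omega
        · have := h8 w h; omega
      · intro hq
        exact hcfalse _ (by omega) (by omega) (hsmall _ (by omega))
  · -- lo = 1, hi = 2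
    have hl1 : lo = 1 := by omega
    have hh2 : hi = 2 := by omega
    subst hl1; subst hh2
    have hbl : (if v.contains (1:Int) then ([]:List Int) else chlL 1) = [] := by
      split
      · rfl
      · simp only [chlL]; rw [if_neg (by norm_num)]
    rw [hbl, List.nil_append]
    rw [show (if (2:Int) ≤ 1 then (1:Int) else 2) = 2 from by norm_num]
    rw [show PySem.Int.floordiv (2:Int) 2 = 1 from by decide]
    rw [show (2:Int) - 1 = 1 from by norm_num]
    have hcc : (insIf (insIf v 1 d) 2 d).contains (1:Int) = true := by
      rw [hcont 1]; simp
    refine ⟨by omega, by omega, ?_, ?_, ?_, ?_, ?_, ?_, ?_⟩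
    · intro w hw
      split at hw
      · simp at hw
      · simp only [chlL] at hw
        rw [if_pos (by norm_num)] at hw
        rw [show PySem.Int.floordiv (2:Int) 2 = 1 from by decide] at hw
        rw [show (2:Int) - 1 = 1 from by norm_num] at hw
        simp at hw
        omega
    · intro h; exact absurd hcc h
    · intro h; exact absurd hcc h
    · intro hlt; omega
    · intro hq; omega
    · intro w hw
      rw [hcont w] at hw
      simp only [Bool.or_eq_true, beq_iff_eq] at hw
      rcases hw with h | h | h
      · omega
      · omega
      · have := h8 w h; omega
    · intro hq; omega

-- the level driver equals B's interval walk, by strong induction on the measure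
theorem sim : ∀ (n : Nat) (f : List Int) (lo hi d : Int) (v : PySem.Dict Int Int),
    pvMeasB f ≤ n → InvF f lo hi v → loopB f d v = loopC lo hi d v := by
  intro n
  induction n with
  | zero =>
    intro f lo hi d v hm hI
    cases f with
    | nil => rw [loopB_nil]; exact sim_nil lo hi d v hI
    | cons c cs =>
      exfalso
      have hp : 0 < 3 ^ c.toNat := Nat.pow_pos (by norm_num)
      have : pvMeasB (c :: cs) = 3 ^ c.toNat + pvMeasB cs := by simp [pvMeasB]
      omega
  | succ n ih =>
    intro f lo hi d v hm hI
    cases f with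
    | nil => rw [loopB_nil]; exact sim_nil lo hi d v hI
    | cons c cs =>
      obtain ⟨i1, i2, i3, i4, i5, i6, i7, i8, i9⟩ := hI
      have hcanon := fold_canon d lo hi (c :: cs) v [] i1 i3 i4 i5 i6
      have hb := pvInnerBound d (c :: cs) v []
      rw [hcanon, fold_pair] at hb
      rw [loopB_cons, hcanon, fold_pair]
      dsimp only
      rw [List.nil_append]
      by_cases hstop : hi < 2
      · rw [loopC_stop _ _ _ _ hstop]
        have hb1 : (if v.contains lo then ([]:List Int) else chlL lo) = [] := by
          split
          · rfl
          · simp only [chlL]; rw [if_neg (by omega)]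
        have hb2 : (if (insIf v lo d).contains hi then ([]:List Int) else chlL hi) = [] := by
          split
          · rfl
          · simp only [chlL]; rw [if_neg (by omega)]
        rw [hb1, hb2, List.append_nil, loopB_nil]
      · rw [loopC_go _ _ _ _ hstop]
        refine ih _ _ _ _ _ ?_ (inv_step lo hi d v i1 i2 i7 i8 i9 (by omega))
        dsimp only at hb
        have hz : pvMeasB ([] : List Int) = 0 := by simp [pvMeasB]
        have hp : 0 < 3 ^ c.toNat := Nat.pow_pos (by norm_num)
        have hmc : pvMeasB (c :: cs) = 3 ^ c.toNat + pvMeasB cs := by simp [pvMeasB]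
        simp only [List.length_cons, List.nil_append] at hb
        omega

-- ===== VERDICT (by name: the statement is the Claim_ definition above) =====
theorem get_possible_lengths_spec : Claim_equal_get_possible_lengths := by
  intro x _
  unfold Spec_get_possible_lengths get_possible_lengths get_possible_lengths_alt
  have h := pvMain (pvMeasB [x]) [x] 0 PySem.Dict.empty le_rfl
  simp only [List.map_cons, List.map_nil] at h
  rw [h, sim (pvMeasB [x]) [x] x x 0 PySem.Dict.empty le_rfl (inv_init x)]
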